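-- pv_equiv track=rewrite | github.com/cmaloney111/microbus-py | src/microbus_py/transport/inmemory.py | _subject_matches
-- ===== SOURCE A (Python) =====
-- def _subject_matches(pattern_segments: list[str], subject_segments: list[str]) -> bool:
--     n = len(pattern_segments)
--     m = len(subject_segments)
--     for i, seg in enumerate(pattern_segments):
--         if seg == ">":
--             return i == n - 1 and m >= n
--         if i >= m:
--             return False
--         if seg == "*":
--             continue
--         if seg != subject_segments[i]:
--             return False
--     return n == m
-- ===== SOURCE B (Python) =====
-- def _subject_matches(pattern_segments: list[str], subject_segments: list[str]) -> bool:
--     pending = pattern_segments[::-1]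
--     remaining = subject_segments[::-1]
--     while pending:
--         head = pending.pop()
--         if head == ">":
--             return not pending and bool(remaining)
--         if not remaining:
--             return False
--         seg = remaining.pop()
--         if head != "*" and head != seg:
--             return False
--     return not remaining
-- ===== Notes on version B (the rewrite author's own statement) =====
-- stated objective: alternative
-- what changed: Replaces A's enumerate-indexed loop with length bookkeeping (n, m, i >= m guards, final n == m test) by two explicit stacks: both lists are reversed once and then consumed head-first with O(1) pop(), so no index or length is ever computed and termination is 'both stacks drained'.
import Mathlib
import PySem

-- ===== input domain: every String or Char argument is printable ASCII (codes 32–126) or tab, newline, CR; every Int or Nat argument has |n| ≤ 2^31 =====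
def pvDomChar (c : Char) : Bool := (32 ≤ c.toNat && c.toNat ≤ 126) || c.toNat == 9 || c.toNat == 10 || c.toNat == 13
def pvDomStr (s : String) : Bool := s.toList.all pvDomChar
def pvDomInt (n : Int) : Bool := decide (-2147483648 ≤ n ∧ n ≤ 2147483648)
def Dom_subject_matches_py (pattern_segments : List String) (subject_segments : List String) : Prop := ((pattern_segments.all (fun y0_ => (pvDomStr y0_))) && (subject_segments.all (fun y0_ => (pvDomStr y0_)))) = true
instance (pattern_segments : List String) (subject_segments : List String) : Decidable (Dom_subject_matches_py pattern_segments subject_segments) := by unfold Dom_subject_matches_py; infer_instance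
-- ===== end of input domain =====

-- B replaces A's enumerate-indexed loop with length bookkeeping by two explicit stacks (both lists reversed once, consumed by O(1) pops); an alternative decomposition, same O(n) cost.


-- ===== PORT A =====
-- A's for-loop over enumerate(pattern_segments): index i and the remaining
-- pattern segments are the loop state; n, m, ss are fixed.
def subjectLoopA (ss : List String) (n m : Nat) : Nat → List String → Bool
  | _, [] => n == m
  | i, seg :: rest =>
    if seg = ">" then decide (i = n - 1) && decide (m ≥ n)
    else if i ≥ m then false
    else if seg = "*" then subjectLoopA ss n m (i + 1) rest
    else if seg ≠ ss.getD i "" then false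
    else subjectLoopA ss n m (i + 1) rest

def subject_matches_py (pattern_segments : List String) (subject_segments : List String) : Bool :=
  subjectLoopA subject_segments pattern_segments.length subject_segments.length 0 pattern_segments

-- ===== PORT B =====
-- Source B's while-loop: the two reversed lists are the stacks; pop() = getLast?/dropLast.
def subjectLoopB (pending remaining : List String) : Bool :=
  match hp : pending.getLast? with
  | none => remaining.isEmpty
  | some head =>
    if head = ">" then pending.dropLast.isEmpty && !remaining.isEmpty
    else match remaining.getLast? with
      | none => false
      | some seg =>
        if head ≠ "*" ∧ head ≠ seg then false
        else subjectLoopB pending.dropLast remaining.dropLast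
termination_by pending.length
decreasing_by
  have : pending ≠ [] := by intro h; subst h; simp at hp
  simpa [List.length_dropLast] using Nat.sub_lt (List.length_pos_iff.mpr this) one_pos

def subject_matches_py_alt (pattern_segments : List String) (subject_segments : List String) : Bool :=
  subjectLoopB pattern_segments.reverse subject_segments.reverse

-- ===== PRECONDITION & SPEC =====
def Spec_subject_matches_py (pattern_segments : List String) (subject_segments : List String) (out : Bool) : Prop := out = subject_matches_py_alt pattern_segments subject_segments
instance (pattern_segments : List String) (subject_segments : List String) (out : Bool) : Decidable (Spec_subject_matches_py pattern_segments subject_segments out) := by unfold Spec_subject_matches_py; infer_instance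

-- ===== CLAIM (what is proved, stated in full; the proofs are below) =====
def Claim_equal_subject_matches_py : Prop := ∀ (pattern_segments : List String) (subject_segments : List String), Dom_subject_matches_py pattern_segments subject_segments → Spec_subject_matches_py pattern_segments subject_segments (subject_matches_py pattern_segments subject_segments)

-- ===== LEMMAS AND PROOFS =====

-- Reference matcher (structural recursion) both ports are reduced to.
def specM : List String → List String → Bool
  | [], ss => ss.isEmpty
  | p :: rest, ss =>
    if p = ">" then rest.isEmpty && !ss.isEmpty
    else match ss with
      | [] => false
      | s :: ss' => if p = "*" ∨ p = s then specM rest ss' else false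

theorem drop_getElem? (ss : List String) (i : Nat) (s : String) (ss' : List String)
    (h : ss.drop i = s :: ss') : ss[i]? = some s := by
  have h1 : (ss.drop i)[0]? = ss[i + 0]? := List.getElem?_drop
  simp [h] at h1
  exact h1.symm

theorem drop_succ (ss : List String) (i : Nat) (s : String) (ss' : List String)
    (h : ss.drop i = s :: ss') : ss.drop (i + 1) = ss' := by
  have : ss.drop (i + 1) = (ss.drop i).drop 1 := by
    rw [List.drop_drop]
  simp [this, h]

theorem loopA_eq_specM (rest : List String) : ∀ (i : Nat) (ss ssr : List String),
    ss.length = i + ssr.length → ss.drop i = ssr →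
    subjectLoopA ss (i + rest.length) ss.length i rest = specM rest ssr := by
  induction rest with
  | nil =>
    intro i ss ssr hlen hdrop
    cases ssr <;> simp [subjectLoopA, specM, hlen]
  | cons seg rest ih =>
    intro i ss ssr hlen hdrop
    by_cases hgt : seg = ">"
    · subst hgt
      cases ssr with
      | nil => cases rest <;> simp [subjectLoopA, specM, hlen]
      | cons s ss' => cases rest <;> simp [subjectLoopA, specM, hlen]
    · cases ssr with
      | nil =>
        simp [subjectLoopA, specM, hgt, hlen]
      | cons s ss' =>
        have hm : ¬ i ≥ ss.length := by rw [hlen]; simp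
        have hlen' : ss.length = (i + 1) + ss'.length := by rw [hlen]; simp; omega
        have hdrop' : ss.drop (i + 1) = ss' := drop_succ ss i s ss' hdrop
        have hget : ss[i]? = some s := drop_getElem? ss i s ss' hdrop
        have hre : i + (seg :: rest).length = (i + 1) + rest.length := by simp; omega
        have hIH := ih (i + 1) ss ss' hlen' hdrop'
        rw [show i + 1 + rest.length = i + (rest.length + 1) by omega] at hIH
        by_cases hstar : seg = "*"
        · subst hstar
          simpa [subjectLoopA, specM, hgt, hm, hre] using hIH
        · by_cases heq : seg = s
          · subst heq
            simpa [subjectLoopA, specM, hgt, hm, hstar, hget, hre] using hIH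
          · simp [subjectLoopA, specM, hgt, hm, hstar, hget, heq]

theorem portA_eq_specM (ps ss : List String) : subject_matches_py ps ss = specM ps ss := by
  have := loopA_eq_specM ps 0 ss ss (by simp) (by simp)
  simpa [subject_matches_py] using this

theorem loopB_reverse_eq_specM (ps : List String) : ∀ (ss : List String),
    subjectLoopB ps.reverse ss.reverse = specM ps ss := by
  induction ps with
  | nil =>
    intro ss
    rw [subjectLoopB]
    simp [specM]
  | cons p rest ih =>
    intro ss
    rw [subjectLoopB]
    split
    · rename_i hp
      simp [List.getLast?_reverse] at hp
    · rename_i head hp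
      rw [List.getLast?_reverse] at hp
      simp only [List.head?_cons, Option.some.injEq] at hp
      subst hp
      rw [List.dropLast_reverse]
      simp only [List.tail_cons]
      by_cases hgt : p = ">"
      · cases ss <;> simp [hgt, specM]
      · rw [if_neg hgt]
        split
        · rename_i hr
          rw [List.getLast?_reverse] at hr
          cases ss with
          | nil => simp [specM, hgt]
          | cons s ss' => simp at hr
        · rename_i seg hr
          rw [List.getLast?_reverse] at hr
          cases ss with
          | nil => simp at hr
          | cons s ss' =>
            simp only [List.head?_cons, Option.some.injEq] at hr
            subst hr
            rw [List.dropLast_reverse]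
            simp only [List.tail_cons, specM, if_neg hgt]
            by_cases hp2 : p = "*" ∨ p = s
            · rw [if_neg (by push_neg; tauto), if_pos hp2, ih ss']
            · push_neg at hp2
              rw [if_pos hp2, if_neg (by tauto)]

-- ===== VERDICT (by name: the statement is the Claim_ definition above) =====
theorem subject_matches_py_spec : Claim_equal_subject_matches_py := by
  intro ps ss _
  unfold Spec_subject_matches_py subject_matches_py_alt
  rw [portA_eq_specM, loopB_reverse_eq_specM]
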